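-- pv_equiv track=rewrite | github.com/Zack-Xu-0419/shuffling-cards-experiments | ModShuffle.py | calcNShuffle
-- ===== SOURCE A (Python) =====
-- def InitiateCards(numberOfCards):
--     result = []
--     for i in range(numberOfCards):
--         result.append(i+1)
--     return result
--
-- def disperseDeck(cardsArray, nDecks):
--     result = []
--     for i in range(nDecks):
--         thisDeck = []
--         count = 1
--         for j in cardsArray:
--             if count % nDecks == i:
--                 thisDeck.insert(0, j)
--             count += 1
--         result.append(thisDeck)
--     # When doing modulo, the pile that should appear last would actually appear first since it's divisible, this code is to ensure that it runs
--     finalResult = []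
--     for i in range(nDecks-1):
--         finalResult.append(result[i+1])
--     finalResult.append(result[0])
--     ###
--
--     return finalResult
--
-- def flatten(distributedDeck):
--     result = []
--     for i in distributedDeck:
--         for j in i:
--             result.append(j)
--     return result
--
-- def calcNShuffle(n, d):
--     originalCards = InitiateCards(n)
--
--     shuffleNCount = 2
--     cards = disperseDeck(originalCards, nDecks=d)
--     cards = flatten(cards)
--
--     while originalCards != cards:
--         cards = disperseDeck(cards, nDecks=d)
--         cards = flatten(cards)
--         shuffleNCount += 1
--     return shuffleNCount
-- ===== SOURCE B (Python) =====
-- def calcNShuffle(n, d):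
--     size = n if n > 0 else 0
--     # build the one-shuffle index permutation once, by bucketing positions
--     piles = []
--     for _ in range(d):
--         piles.append([])
--     for j in range(size):
--         piles[(j + 1) % d] = piles[(j + 1) % d] + [j]
--     perm = []
--     for i in range(1, d):
--         perm = perm + list(reversed(piles[i]))
--     perm = perm + list(reversed(piles[0]))
--     ident = list(range(size))
--     cur = perm
--     count = 2
--     while cur != ident:
--         cur = [cur[j] for j in perm]
--         count += 1
--     return count
-- ===== Notes on version B (the rewrite author's own statement) =====
-- stated objective: alternative
-- what changed: B builds the one-shuffle index permutation once by bucketing positions in a single pass and then iterates plain index composition until the identity permutation, instead of re-dispersing the deck into d piles (with insert(0,..)) on every shuffle; intended as faster per shuffle step (one a timing run measured ~28x at the largest size where both finish), but not claimed as faster since on inputs whose shuffle order is astronomical both programs time out - the iteration count itself is the answer.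
import Mathlib
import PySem

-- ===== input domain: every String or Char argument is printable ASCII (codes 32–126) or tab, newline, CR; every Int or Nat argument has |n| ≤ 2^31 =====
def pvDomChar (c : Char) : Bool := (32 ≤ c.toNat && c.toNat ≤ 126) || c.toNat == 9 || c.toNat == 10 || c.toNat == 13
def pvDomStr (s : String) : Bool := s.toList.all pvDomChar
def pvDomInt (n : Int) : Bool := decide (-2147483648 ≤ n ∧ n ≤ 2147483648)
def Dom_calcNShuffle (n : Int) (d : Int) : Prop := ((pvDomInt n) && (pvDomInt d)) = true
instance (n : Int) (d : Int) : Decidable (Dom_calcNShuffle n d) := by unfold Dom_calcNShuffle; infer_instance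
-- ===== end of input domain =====

-- B precomputes the one-shuffle index permutation once (bucketing positions in a single pass)
-- and iterates index composition, instead of re-dispersing the deck into d piles on every shuffle.

-- ===== PORT A =====
def pvInitiateCards (numberOfCards : Int) : List Int :=
  (PySem.List.pyRange 0 numberOfCards).foldl (fun result i => result ++ [i + 1]) []

-- thisDeck.insert(0, j) is a prepend; result[i+1] / result[0] are in range for nDecks ≥ 1
-- (nDecks ≤ 0 raises in Python and is excluded by Pre_), so pyGetD is exact there.
def pvDisperseDeck (cardsArray : List Int) (nDecks : Int) : List (List Int) :=
  let result : List (List Int) := (PySem.List.pyRange 0 nDecks).foldl (fun result i =>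
    let td := cardsArray.foldl
      (fun (st : List Int × Int) j =>
        (if PySem.Int.mod st.2 nDecks = i then j :: st.1 else st.1, st.2 + 1))
      ([], 1)
    result ++ [td.1]) []
  let finalResult := (PySem.List.pyRange 0 (nDecks - 1)).foldl
    (fun fr i => fr ++ [PySem.List.pyGetD result (i + 1) []]) []
  finalResult ++ [PySem.List.pyGetD result 0 []]

def pvFlatten (distributedDeck : List (List Int)) : List Int :=
  distributedDeck.foldl (fun r i => i.foldl (fun r j => r ++ [j]) r) []

-- the while loop; fuel only makes the recursion structural (it never runs out on admitted inputs)
def pvLoopA (orig : List Int) (d : Int) : Nat → List Int → Int → Int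
  | fuel, cards, cnt =>
    if orig = cards then cnt
    else
      match fuel with
      | 0 => cnt
      | f + 1 => pvLoopA orig d f (pvFlatten (pvDisperseDeck cards d)) (cnt + 1)

def calcNShuffle (n : Int) (d : Int) : Int :=
  let originalCards := pvInitiateCards n
  let cards := pvFlatten (pvDisperseDeck originalCards d)
  pvLoopA originalCards d (n.toNat.factorial + 2) cards 2

-- ===== PORT B =====
-- the while loop of Source B; same fuel guard as A's loop (never runs out on admitted inputs)
def pvAltLoop (ident perm : List Int) : Nat → List Int → Int → Int
  | fuel, cur, count =>
    if cur = ident then count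
    else
      match fuel with
      | 0 => count
      | f + 1 => pvAltLoop ident perm f (perm.map fun j => PySem.List.pyGetD cur j 0) (count + 1)

-- indices (j+1) % d and cur[j] are in range for d ≥ 1 (Pre_), so pySetD/pyGetD are exact there
def calcNShuffle_alt (n : Int) (d : Int) : Int :=
  let size : Int := if n > 0 then n else 0
  let piles0 : List (List Int) :=
    (PySem.List.pyRange 0 d).foldl (fun acc _ => acc ++ [([] : List Int)]) []
  let piles := (PySem.List.pyRange 0 size).foldl (fun piles j =>
      PySem.List.pySetD piles (PySem.Int.mod (j + 1) d)
        (PySem.List.pyGetD piles (PySem.Int.mod (j + 1) d) [] ++ [j])) piles0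
  let perm := ((PySem.List.pyRange 1 d).foldl
      (fun perm i => perm ++ (PySem.List.pyGetD piles i []).reverse) [])
      ++ (PySem.List.pyGetD piles 0 []).reverse
  let ident := PySem.List.pyRange 0 size
  pvAltLoop ident perm (n.toNat.factorial + 2) perm 2

-- ===== PRECONDITION & SPEC =====
-- Python A raises IndexError for every d ≤ 0 (result[0] on an empty pile list); it returns on all d ≥ 1.
def Pre_calcNShuffle (n : Int) (d : Int) : Prop := 1 ≤ d
instance (n : Int) (d : Int) : Decidable (Pre_calcNShuffle n d) := by
  unfold Pre_calcNShuffle; infer_instance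
def pvWitness_calcNShuffle : Int × Int := (6, 2)

def Spec_calcNShuffle (n : Int) (d : Int) (out : Int) : Prop := out = calcNShuffle_alt n d
instance (n : Int) (d : Int) (out : Int) : Decidable (Spec_calcNShuffle n d out) := by
  unfold Spec_calcNShuffle; infer_instance

-- ===== CLAIM (what is proved, stated in full; the proofs are below) =====
def Claim_equal_calcNShuffle : Prop := ∀ (n : Int) (d : Int), Dom_calcNShuffle n d → Pre_calcNShuffle n d → Spec_calcNShuffle n d (calcNShuffle n d)

-- ===== LEMMAS AND PROOFS =====

-- one whole shuffle of A
def pvStep (d : Int) (xs : List Int) : List Int := pvFlatten (pvDisperseDeck xs d)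

-- the pile accumulated by A's inner loop for residue i
def pvPile (d i : Int) (xs : List Int) : List Int :=
  (xs.foldl (fun (st : List Int × Int) j =>
    (if PySem.Int.mod st.2 d = i then j :: st.1 else st.1, st.2 + 1)) ([], 1)).1

-- B's bucket list and permutation, as computed inside calcNShuffle_alt
def pvPiles (size d : Int) : List (List Int) :=
  (PySem.List.pyRange 0 size).foldl (fun piles j =>
      PySem.List.pySetD piles (PySem.Int.mod (j + 1) d)
        (PySem.List.pyGetD piles (PySem.Int.mod (j + 1) d) [] ++ [j]))
    ((PySem.List.pyRange 0 d).foldl (fun acc _ => acc ++ [([] : List Int)]) [])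

def pvPerm (size d : Int) : List Int :=
  ((PySem.List.pyRange 1 d).foldl
      (fun perm i => perm ++ (PySem.List.pyGetD (pvPiles size d) i []).reverse) [])
    ++ (PySem.List.pyGetD (pvPiles size d) 0 []).reverse

lemma pvFoldl_append (l : List (List Int)) : ∀ acc : List Int,
    l.foldl (fun r i => r ++ i) acc = acc ++ l.flatten := by
  induction l with
  | nil => intro acc; simp
  | cons x t ih => intro acc; simp [List.foldl_cons, ih, List.append_assoc]

lemma pvFlatten_eq (dd : List (List Int)) : pvFlatten dd = dd.flatten := by
  have h : ∀ (l : List (List Int)) (acc : List Int),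
      l.foldl (fun r i => i.foldl (fun r j => r ++ [j]) r) acc = l.foldl (fun r i => r ++ i) acc := by
    intro l
    induction l with
    | nil => intro acc; rfl
    | cons x t ih =>
      intro acc
      simp only [List.foldl_cons, PySem.List.foldl_append_singleton_eq_self]
  unfold pvFlatten
  rw [h, pvFoldl_append]; simp

lemma pvInit_eq (n : Int) :
    pvInitiateCards n = (PySem.List.pyRange 0 n).map (· + 1) := by
  unfold pvInitiateCards
  rw [PySem.List.foldl_append_singleton_eq_map]; simp

-- fold of a list-building loop with appended pieces is a flatten
lemma pvFoldl_pieces (g : Int → List Int) (l : List Int) : ∀ acc,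
    l.foldl (fun p i => p ++ g i) acc = acc ++ (l.map g).flatten := by
  induction l with
  | nil => intro acc; simp
  | cons x t ih => intro acc; simp [List.foldl_cons, ih, List.append_assoc]

-- characterisation of A's inner pile loop via enumerate
lemma pvPile_fold (d i : Int) (xs : List Int) : ∀ (acc : List Int) (c : Int),
    xs.foldl (fun (st : List Int × Int) j =>
      (if PySem.Int.mod st.2 d = i then j :: st.1 else st.1, st.2 + 1)) (acc, c)
    = ((((PySem.List.enumerate xs c).filter
          (fun p => decide (PySem.Int.mod p.1 d = i))).map Prod.snd).reverse ++ acc,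
        c + xs.length) := by
  induction xs with
  | nil => intro acc c; simp [PySem.List.enumerate]
  | cons x t ih =>
    intro acc c
    simp only [List.foldl_cons, PySem.List.enumerate, List.filter_cons]
    by_cases h : PySem.Int.mod c d = i
    · simp only [h, decide_true, if_true, ih, List.map_cons, List.reverse_cons,
        List.append_assoc, List.singleton_append, List.length_cons, Prod.mk.injEq]
      exact ⟨by simp, by push_cast; ring⟩
    · have hd : decide (PySem.Int.mod c d = i) = false := by simp [h]
      simp only [h, if_false, ih, List.length_cons, Prod.mk.injEq]
      exact ⟨by simp, by push_cast; ring⟩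

lemma pvPile_eq (d i : Int) (xs : List Int) :
    pvPile d i xs
      = (((PySem.List.enumerate xs 1).filter
          (fun p => decide (PySem.Int.mod p.1 d = i))).map Prod.snd).reverse := by
  unfold pvPile
  rw [pvPile_fold]; simp

lemma pvDisperse_eq (d : Int) (hd : 1 ≤ d) (xs : List Int) :
    pvDisperseDeck xs d
      = (PySem.List.pyRange 0 (d - 1)).map (fun i => pvPile d (i + 1) xs)
        ++ [pvPile d 0 xs] := by
  unfold pvDisperseDeck
  simp only [PySem.List.foldl_append_singleton_eq_map, List.nil_append]
  congr 1
  · apply List.map_congr_left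
    intro i hi
    rw [PySem.List.mem_pyRange_one] at hi
    rw [PySem.List.pyGetD_map_pyRange_of_nonneg _ d _ _ (by omega) (by omega)]
    rfl
  · rw [PySem.List.pyGetD_map_pyRange_of_nonneg _ d _ _ le_rfl (by omega)]
    rfl

lemma pvRange_shift (d : Int) (g : Int → List Int) :
    (PySem.List.pyRange 0 (d - 1)).map (fun i => g (i + 1))
      = (PySem.List.pyRange 1 d).map g := by
  rw [PySem.List.pyRange_one, PySem.List.pyRange_one]
  have h1 : d - 1 - 0 = d - 1 := by ring
  rw [h1]
  simp only [List.map_map]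
  apply List.map_congr_left
  intro k _
  simp only [Function.comp]
  norm_num
  ring_nf

lemma pvStep_eq (d : Int) (hd : 1 ≤ d) (xs : List Int) :
    pvStep d xs
      = (((PySem.List.pyRange 1 d).map (fun i => pvPile d i xs)).flatten)
        ++ pvPile d 0 xs := by
  unfold pvStep
  rw [pvFlatten_eq, pvDisperse_eq d hd, List.flatten_append]
  rw [← pvRange_shift d (fun i => pvPile d i xs)]
  simp

lemma pvEnumerate_map (f : Int → Int) (xs : List Int) : ∀ c,
    PySem.List.enumerate (xs.map f) c
      = (PySem.List.enumerate xs c).map (fun p => (p.1, f p.2)) := by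
  induction xs with
  | nil => intro c; simp [PySem.List.enumerate]
  | cons x t ih => intro c; simp [PySem.List.enumerate, ih]

lemma pvPile_map (d i : Int) (f : Int → Int) (xs : List Int) :
    pvPile d i (xs.map f) = (pvPile d i xs).map f := by
  rw [pvPile_eq, pvPile_eq, pvEnumerate_map, List.filter_map]
  have h1 : (Prod.snd ∘ fun p : Int × Int => (p.1, f p.2)) = f ∘ Prod.snd := rfl
  have h2 : ((fun p : Int × Int => decide (PySem.Int.mod p.1 d = i)) ∘ fun p => (p.1, f p.2))
      = (fun p : Int × Int => decide (PySem.Int.mod p.1 d = i)) := rfl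
  rw [List.map_map, h1, h2, ← List.map_map, List.map_reverse]

lemma pvStep_map (d : Int) (hd : 1 ≤ d) (f : Int → Int) (xs : List Int) :
    pvStep d (xs.map f) = (pvStep d xs).map f := by
  rw [pvStep_eq d hd, pvStep_eq d hd, List.map_append, List.map_flatten, List.map_map]
  congr 1
  · congr 1; apply List.map_congr_left; intro i _; exact pvPile_map d i f xs
  · exact pvPile_map d 0 f xs

lemma pvPile_mem (d i : Int) (xs : List Int) {a : Int} (h : a ∈ pvPile d i xs) : a ∈ xs := by
  rw [pvPile_eq] at h
  rw [List.mem_reverse] at h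
  obtain ⟨p, hp, rfl⟩ := List.mem_map.1 h
  have hmem : p ∈ PySem.List.enumerate xs 1 := (List.mem_filter.1 hp).1
  have h2 : p.2 ∈ (PySem.List.enumerate xs 1).map Prod.snd := List.mem_map.2 ⟨p, hmem, rfl⟩
  rwa [PySem.List.map_snd_enumerate] at h2

lemma pvStep_mem (d : Int) (hd : 1 ≤ d) (xs : List Int) {a : Int}
    (h : a ∈ pvStep d xs) : a ∈ xs := by
  rw [pvStep_eq d hd] at h
  rcases List.mem_append.1 h with h | h
  · obtain ⟨l, hl, ha⟩ := List.mem_flatten.1 h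
    obtain ⟨i, _, rfl⟩ := List.mem_map.1 hl
    exact pvPile_mem d i xs ha
  · exact pvPile_mem d 0 xs h

-- enumerate of a range of consecutive integers pairs each j with j+1
lemma pvEnum_range_aux (k : Nat) : ∀ (a b : Int), (b - a).toNat = k →
    PySem.List.enumerate (PySem.List.pyRange a b) (a + 1)
      = (PySem.List.pyRange a b).map (fun j => (j + 1, j)) := by
  induction k with
  | zero =>
    intro a b hk
    rw [PySem.List.pyRange_one_eq_nil (by omega)]
    simp [PySem.List.enumerate]
  | succ k ih =>
    intro a b hk
    rw [PySem.List.pyRange_one_cons (by omega)]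
    simp only [PySem.List.enumerate, List.map_cons]
    congr 1
    exact ih (a + 1) b (by omega)

lemma pvEnum_range0 (b : Int) :
    PySem.List.enumerate (PySem.List.pyRange 0 b) 1
      = (PySem.List.pyRange 0 b).map (fun j => (j + 1, j)) := by
  have := pvEnum_range_aux (b - 0).toNat 0 b rfl
  norm_num at this
  exact this

lemma pvPile_ident (d : Int) (size : Int) (i : Int) :
    pvPile d i (PySem.List.pyRange 0 size)
      = ((PySem.List.pyRange 0 size).filter
          (fun j => decide (PySem.Int.mod (j + 1) d = i))).reverse := by
  rw [pvPile_eq, pvEnum_range0, List.filter_map, List.map_map]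
  congr 1
  have hid : (Prod.snd ∘ fun j : Int => (j + 1, j)) = id := rfl
  rw [hid, List.map_id]
  rfl

-- B's bucket-building loop: bucket i holds exactly the positions j with (j+1) % d = i
lemma pvPiles_aux (d : Int) (hd : 1 ≤ d) : ∀ (k : Nat),
    (pvPiles (k : Int) d).length = d.toNat ∧
      ∀ i : Int, 0 ≤ i → i < d →
        PySem.List.pyGetD (pvPiles (k : Int) d) i []
          = (PySem.List.pyRange 0 (k : Int)).filter
              (fun j => decide (PySem.Int.mod (j + 1) d = i)) := by
  intro k
  induction k with
  | zero =>
    unfold pvPiles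
    rw [show ((0 : Nat) : Int) = 0 from rfl, PySem.List.pyRange_one_eq_nil le_rfl]
    simp only [List.foldl_nil, List.filter_nil]
    rw [PySem.List.foldl_append_singleton_eq_map]
    constructor
    · simp [PySem.List.length_pyRange_one]
    · intro i h0 hlt
      rw [List.nil_append, PySem.List.pyGetD_map_pyRange_of_nonneg _ d _ _ h0 hlt]
  | succ k ih =>
    obtain ⟨ihlen, ihget⟩ := ih
    have hsr : PySem.List.pyRange 0 ((k + 1 : Nat) : Int)
        = PySem.List.pyRange 0 (k : Int) ++ [(k : Int)] := by
      have hc : ((k + 1 : Nat) : Int) = (k : Int) + 1 := by push_cast; ring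
      rw [hc, PySem.List.pyRange_one_succ_right (by positivity)]
    have hunf : pvPiles ((k + 1 : Nat) : Int) d
        = PySem.List.pySetD (pvPiles (k : Int) d) (PySem.Int.mod ((k : Int) + 1) d)
            (PySem.List.pyGetD (pvPiles (k : Int) d) (PySem.Int.mod ((k : Int) + 1) d) []
              ++ [(k : Int)]) := by
      unfold pvPiles
      rw [hsr, List.foldl_append, List.foldl_cons, List.foldl_nil]
    have hr0 : 0 ≤ PySem.Int.mod ((k : Int) + 1) d := by
      rw [PySem.Int.mod_eq_emod_of_pos (by omega)]
      exact Int.emod_nonneg _ (by omega)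
    have hrd : PySem.Int.mod ((k : Int) + 1) d < d := by
      rw [PySem.Int.mod_eq_emod_of_pos (by omega)]
      exact Int.emod_lt_of_pos _ (by omega)
    set r : Int := PySem.Int.mod ((k : Int) + 1) d with hrdef
    have hrcast : r = ((r.toNat : Nat) : Int) := (Int.toNat_of_nonneg hr0).symm
    constructor
    · rw [hunf, PySem.List.length_pySetD, ihlen]
    · intro i h0 hlt
      have hicast : i = ((i.toNat : Nat) : Int) := (Int.toNat_of_nonneg h0).symm
      rw [hunf, hrcast, hicast,
        PySem.List.pyGetD_pySetD_natCast _ r.toNat i.toNat _ _ (by rw [ihlen]; omega)]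
      rw [hsr, List.filter_append, List.filter_cons, List.filter_nil]
      by_cases hir : i.toNat = r.toNat
      · have hireq : i = r := by omega
        have hdec : decide (PySem.Int.mod ((k : Int) + 1) d = i) = true := by
          simp [← hrdef, hireq]
        rw [if_pos hir, ← hicast]
        simp only [hdec, if_true]
        rw [← hrcast, ← hireq, ihget i h0 hlt]
      · have hine : ¬ (i = r) := by omega
        have hdec : decide (PySem.Int.mod ((k : Int) + 1) d = i) = false := by
          simp only [← hrdef, decide_eq_false_iff_not]
          omega
        rw [if_neg hir, ← hicast]
        simp only [hdec, Bool.false_eq_true, if_false, List.append_nil]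
        exact ihget i h0 hlt

lemma pvPiles_spec (size d : Int) (hd : 1 ≤ d) (hs : 0 ≤ size) :
    (pvPiles size d).length = d.toNat ∧
      ∀ i : Int, 0 ≤ i → i < d →
        PySem.List.pyGetD (pvPiles size d) i []
          = (PySem.List.pyRange 0 size).filter
              (fun j => decide (PySem.Int.mod (j + 1) d = i)) := by
  have h := pvPiles_aux d hd size.toNat
  rw [Int.toNat_of_nonneg hs] at h
  exact h

lemma pvPerm_eq (size d : Int) (hd : 1 ≤ d) (hs : 0 ≤ size) :
    pvPerm size d = pvStep d (PySem.List.pyRange 0 size) := by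
  obtain ⟨hlen, hget⟩ := pvPiles_spec size d hd hs
  unfold pvPerm
  rw [pvFoldl_pieces, List.nil_append, pvStep_eq d hd]
  congr 1
  · congr 1
    apply List.map_congr_left
    intro i hi
    rw [PySem.List.mem_pyRange_one] at hi
    rw [hget i (by omega) (by omega), pvPile_ident]
  · rw [hget 0 le_rfl (by omega), pvPile_ident]

lemma pvPerm_length_mem_aux {a : Int} {l : List Int} (h : a ∈ l) (hnd : l.Nodup) :
    ∀ f : Int → Nat, (l.map (fun i => (if a = i then 1 else 0) + f i)).sum
      = 1 + (l.map f).sum := by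
  induction l with
  | nil => cases h
  | cons x t ih =>
    intro f
    rcases List.mem_cons.1 h with rfl | hat
    · have hnot : a ∉ t := (List.nodup_cons.1 hnd).1
      have hz : (t.map (fun i => (if a = i then 1 else 0) + f i)).sum = (t.map f).sum := by
        clear ih h hnd
        induction t with
        | nil => rfl
        | cons y s ihs =>
          simp only [List.mem_cons, not_or] at hnot
          simp only [List.map_cons, List.sum_cons, if_neg (hnot.1), ihs hnot.2]
          omega
      simp only [List.map_cons, List.sum_cons, hz]
      norm_num
      omega
    · by_cases hax : a = x
      · exact absurd (hax ▸ hat) ((List.nodup_cons.1 hnd).1 : x ∉ t)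
      · simp only [List.map_cons, List.sum_cons, if_neg hax,
          ih hat ((List.nodup_cons.1 hnd).2)]
        omega

-- the d filters partition a list, so the piece lengths sum to the whole length
lemma pvCount (d : Int) (l : List Int) (is : List Int) (hnd : is.Nodup)
    (hmem : ∀ x ∈ l, PySem.Int.mod (x + 1) d ∈ is) :
    (is.map (fun i => (l.filter (fun j => decide (PySem.Int.mod (j + 1) d = i))).length)).sum
      = l.length := by
  induction l with
  | nil => simp
  | cons x t ih =>
    have hx := hmem x (List.mem_cons_self)
    have hcong : is.map (fun i => ((x :: t).filter
        (fun j => decide (PySem.Int.mod (j + 1) d = i))).length)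
        = is.map (fun i => (if PySem.Int.mod (x + 1) d = i then 1 else 0)
            + ((t.filter (fun j => decide (PySem.Int.mod (j + 1) d = i))).length)) := by
      apply List.map_congr_left
      intro i _
      rw [List.filter_cons]
      by_cases hxi : PySem.Int.mod (x + 1) d = i
      · simp [hxi]
        omega
      · simp [hxi]
    rw [hcong, pvPerm_length_mem_aux hx hnd, ih (fun y hy => hmem y (List.mem_cons_of_mem _ hy))]
    simp only [List.length_cons]
    omega

lemma pvPerm_length (size d : Int) (hd : 1 ≤ d) (hs : 0 ≤ size) :
    (pvPerm size d).length = size.toNat := by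
  rw [pvPerm_eq size d hd hs, pvStep_eq d hd, List.length_append, List.length_flatten,
    List.map_map]
  have hpile : ∀ i : Int, (pvPile d i (PySem.List.pyRange 0 size)).length
      = ((PySem.List.pyRange 0 size).filter
          (fun j => decide (PySem.Int.mod (j + 1) d = i))).length := by
    intro i; rw [pvPile_ident, List.length_reverse]
  have hnd : (PySem.List.pyRange 1 d ++ [0]).Nodup := by
    rw [List.nodup_append]
    refine ⟨PySem.List.nodup_pyRange_one 1 d, List.nodup_singleton 0, ?_⟩
    intro a ha b hb
    rw [PySem.List.mem_pyRange_one] at ha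
    rw [List.mem_singleton] at hb
    omega
  have hmem : ∀ x ∈ PySem.List.pyRange 0 size,
      PySem.Int.mod (x + 1) d ∈ PySem.List.pyRange 1 d ++ [0] := by
    intro x _
    have h0 : 0 ≤ PySem.Int.mod (x + 1) d := by
      rw [PySem.Int.mod_eq_emod_of_pos (by omega)]
      exact Int.emod_nonneg _ (by omega)
    have hlt : PySem.Int.mod (x + 1) d < d := by
      rw [PySem.Int.mod_eq_emod_of_pos (by omega)]
      exact Int.emod_lt_of_pos _ (by omega)
    rw [List.mem_append]
    by_cases hz : PySem.Int.mod (x + 1) d = 0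
    · right; simp [hz]
    · left; rw [PySem.List.mem_pyRange_one]; omega
  have hcount := pvCount d (PySem.List.pyRange 0 size) (PySem.List.pyRange 1 d ++ [0]) hnd hmem
  rw [List.map_append, List.sum_append] at hcount
  simp only [List.map_cons, List.map_nil, List.sum_cons, List.sum_nil] at hcount
  have hcomp : ((PySem.List.pyRange 1 d).map (List.length ∘
      fun i => pvPile d i (PySem.List.pyRange 0 size))).sum
      = ((PySem.List.pyRange 1 d).map (fun i => ((PySem.List.pyRange 0 size).filter
          (fun j => decide (PySem.Int.mod (j + 1) d = i))).length)).sum := by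
    congr 1
    apply List.map_congr_left
    intro i _
    exact hpile i
  rw [hcomp, hpile 0]
  rw [PySem.List.length_pyRange_one] at hcount
  omega

lemma pvPerm_mem (size d : Int) (hd : 1 ≤ d) (hs : 0 ≤ size) {j : Int}
    (h : j ∈ pvPerm size d) : 0 ≤ j ∧ j < size := by
  rw [pvPerm_eq size d hd hs] at h
  have := pvStep_mem d hd _ h
  rw [PySem.List.mem_pyRange_one] at this
  exact this

-- positional characterisation: one shuffle of any list of the right length reads it through pvPerm
lemma pvStep_positional (size d : Int) (hd : 1 ≤ d) (hs : 0 ≤ size) (xs : List Int)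
    (hlen : xs.length = size.toNat) :
    pvStep d xs = (pvPerm size d).map (fun j => PySem.List.pyGetD xs j 0) := by
  have hx : xs = (PySem.List.pyRange 0 size).map (fun j => PySem.List.pyGetD xs j 0) := by
    have h := PySem.List.map_pyGetD_pyRange_zero' xs 0
    rw [hlen, Int.toNat_of_nonneg hs] at h
    exact h.symm
  calc pvStep d xs
      = pvStep d ((PySem.List.pyRange 0 size).map (fun j => PySem.List.pyGetD xs j 0)) := by
        rw [← hx]
    _ = (pvStep d (PySem.List.pyRange 0 size)).map (fun j => PySem.List.pyGetD xs j 0) :=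
        pvStep_map d hd _ _
    _ = (pvPerm size d).map (fun j => PySem.List.pyGetD xs j 0) := by
        rw [pvPerm_eq size d hd hs]

lemma pvMap_add_one_inj {l₁ l₂ : List Int} (h : l₁.map (· + 1) = l₂.map (· + 1)) : l₁ = l₂ := by
  have hinj : Function.Injective (fun x : Int => x + 1) := by
    intro a b hab
    have h' : a + 1 = b + 1 := hab
    omega
  exact List.map_injective_iff.2 hinj h

-- the two loops run in lockstep
lemma pvLockstep (size d : Int) (hd : 1 ≤ d) (hs : 0 ≤ size) :
    ∀ (fuel : Nat) (cur : List Int) (cnt : Int),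
      cur.length = size.toNat → (∀ j ∈ cur, 0 ≤ j ∧ j < size) →
      pvLoopA ((PySem.List.pyRange 0 size).map (· + 1)) d fuel (cur.map (· + 1)) cnt
        = pvAltLoop (PySem.List.pyRange 0 size) (pvPerm size d) fuel cur cnt := by
  intro fuel
  induction fuel with
  | zero =>
    intro cur cnt hlen hb
    rw [pvLoopA, pvAltLoop]
    by_cases hc : PySem.List.pyRange 0 size = cur
    · rw [if_pos (by rw [hc]), if_pos hc.symm]
    · rw [if_neg (fun h => hc (pvMap_add_one_inj h)), if_neg (fun h => hc h.symm)]
  | succ f ih =>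
    intro cur cnt hlen hb
    rw [pvLoopA, pvAltLoop]
    by_cases hc : PySem.List.pyRange 0 size = cur
    · rw [if_pos (by rw [hc]), if_pos hc.symm]
    · rw [if_neg (fun h => hc (pvMap_add_one_inj h)), if_neg (fun h => hc h.symm)]
      have hstep : pvFlatten (pvDisperseDeck (cur.map (· + 1)) d)
          = ((pvPerm size d).map (fun j => PySem.List.pyGetD cur j 0)).map (· + 1) := by
        have h1 : pvFlatten (pvDisperseDeck (cur.map (· + 1)) d) = pvStep d (cur.map (· + 1)) := rfl
        rw [h1, pvStep_map d hd, pvStep_positional size d hd hs cur hlen]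
      rw [hstep]
      apply ih
      · rw [List.length_map, pvPerm_length size d hd hs]
      · intro j hj
        obtain ⟨j', hj', rfl⟩ := List.mem_map.1 hj
        have hbnd := pvPerm_mem size d hd hs hj'
        have hin : PySem.Raise.InRange cur.length j' := by
          constructor
          · omega
          · have : j' < size := hbnd.2
            omega
        exact hb _ (PySem.List.pyGetD_mem cur 0 hin)

-- ===== VERDICT (by name: the statement is the Claim_ definition above) =====
theorem calcNShuffle_spec : Claim_equal_calcNShuffle := by
  intro n d _ hpre
  unfold Pre_calcNShuffle at hpre
  unfold Spec_calcNShuffle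
  set size : Int := if n > 0 then n else 0 with hsize
  have hs : 0 ≤ size := by rw [hsize]; split <;> omega
  have hrange : PySem.List.pyRange 0 n = PySem.List.pyRange 0 size := by
    rw [hsize]
    split
    · rfl
    · rw [PySem.List.pyRange_one_eq_nil (by omega), PySem.List.pyRange_one_eq_nil le_rfl]
  have horig : pvInitiateCards n = (PySem.List.pyRange 0 size).map (· + 1) := by
    rw [pvInit_eq, hrange]
  have halt : calcNShuffle_alt n d
      = pvAltLoop (PySem.List.pyRange 0 size) (pvPerm size d) (n.toNat.factorial + 2)
          (pvPerm size d) 2 := rfl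
  have hA : calcNShuffle n d
      = pvLoopA (pvInitiateCards n) d (n.toNat.factorial + 2)
          (pvStep d (pvInitiateCards n)) 2 := rfl
  rw [hA, halt, horig]
  have hcards : pvStep d ((PySem.List.pyRange 0 size).map (· + 1))
      = (pvPerm size d).map (· + 1) := by
    rw [pvStep_map d hpre, pvPerm_eq size d hpre hs]
  rw [hcards]
  apply pvLockstep size d hpre hs
  · exact pvPerm_length size d hpre hs
  · intro j hj
    exact pvPerm_mem size d hpre hs hj
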